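-- pv_equiv track=rewrite | github.com/ArtemBabaiev/Uni_Comp_Discrete_Math | Lab4/functions.py | find_num_num
-- ===== SOURCE A (Python) =====
-- def find_num_num(maxi):
--     i = 1
--     while True:
--         match = 2**i
--         if maxi <= match:
--             return i
--         elif maxi>match:
--             i+=1
-- ===== SOURCE B (Python) =====
-- def find_num_num(maxi):
--     return (maxi - 1).bit_length() if maxi > 2 else 1
-- ===== Notes on version B (the rewrite author's own statement) =====
-- stated objective: idiomatic
-- what changed: Replaces the loop that grows powers of two one by one with a closed form using int.bit_length on maxi-1 (with the trivial-range answer 1 for maxi <= 2).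
import Mathlib
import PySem

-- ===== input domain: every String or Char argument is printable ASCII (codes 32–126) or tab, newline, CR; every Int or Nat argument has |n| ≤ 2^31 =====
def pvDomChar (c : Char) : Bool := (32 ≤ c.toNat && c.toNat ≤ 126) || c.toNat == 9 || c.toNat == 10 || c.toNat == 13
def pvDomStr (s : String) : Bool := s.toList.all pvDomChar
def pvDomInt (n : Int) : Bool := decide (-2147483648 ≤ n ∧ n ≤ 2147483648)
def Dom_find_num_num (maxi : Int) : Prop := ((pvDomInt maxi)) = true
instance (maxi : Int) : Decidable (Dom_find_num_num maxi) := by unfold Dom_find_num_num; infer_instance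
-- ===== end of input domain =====

-- B replaces A's growing-powers loop by a closed form via int.bit_length (more idiomatic).


-- ===== PORT A =====
-- A's while-True loop: i starts at 1, returns i once maxi ≤ 2^i, else i += 1.
-- Fuel only makes the recursion total; 63 steps suffice for every maxi in Dom (|maxi| ≤ 2^31).
def findGo (maxi : Int) : Nat → Nat → Int
  | 0, i => (i : Int)
  | fuel + 1, i => if maxi ≤ 2 ^ i then (i : Int) else findGo maxi fuel (i + 1)

def find_num_num (maxi : Int) : Int := findGo maxi 63 1

-- ===== PORT B =====
def find_num_num_alt (maxi : Int) : Int :=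
  if maxi > 2 then ((PySem.Int.bitLength (maxi - 1) : Nat) : Int) else 1

-- ===== PRECONDITION & SPEC =====
def Spec_find_num_num (maxi : Int) (out : Int) : Prop := out = find_num_num_alt maxi
instance (maxi : Int) (out : Int) : Decidable (Spec_find_num_num maxi out) := by unfold Spec_find_num_num; infer_instance

-- ===== CLAIM (what is proved, stated in full; the proofs are below) =====
def Claim_equal_find_num_num : Prop := ∀ (maxi : Int), Dom_find_num_num maxi → Spec_find_num_num maxi (find_num_num maxi)

-- ===== LEMMAS AND PROOFS =====

-- The loop returns t whenever t is the least index ≥ i with maxi ≤ 2^t and the fuel reaches t.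
theorem findGo_eq (maxi : Int) (fuel : Nat) :
    ∀ i t : Nat, i ≤ t → t ≤ i + fuel → maxi ≤ 2 ^ t →
      (∀ k, i ≤ k → k < t → 2 ^ k < maxi) → findGo maxi fuel i = (t : Int) := by
  induction fuel with
  | zero =>
    intro i t hit hti _ _
    have : i = t := by omega
    simp [findGo, this]
  | succ fuel ih =>
    intro i t hit hti hle hlt
    by_cases h : maxi ≤ 2 ^ i
    · have : i = t := by
        by_contra hne
        exact absurd h (not_le.mpr (hlt i le_rfl (by omega)))
      subst this
      simp [findGo, h]
    · have hit' : i + 1 ≤ t := by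
        rcases Nat.lt_or_ge i t with hlt' | hge
        · omega
        · have : i = t := by omega
          exact absurd (this ▸ hle) h
      have := ih (i + 1) t hit' (by omega) hle (fun k hk1 hk2 => hlt k (by omega) hk2)
      simpa [findGo, h] using this

theorem find_num_num_spec : Claim_equal_find_num_num := by
  intro maxi hdom
  have hbound : maxi ≤ 2147483648 := by
    unfold Dom_find_num_num pvDomInt at hdom
    exact (of_decide_eq_true hdom).2
  unfold Spec_find_num_num find_num_num find_num_num_alt
  by_cases h2 : maxi > 2
  · set t := PySem.Int.bitLength (maxi - 1) with ht
    have hpos : maxi - 1 ≥ 2 := by omega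
    have hne : maxi - 1 ≠ 0 := by omega
    have habs : ((maxi - 1).natAbs : Int) = maxi - 1 := Int.natAbs_of_nonneg (by omega)
    -- maxi ≤ 2^t
    have hub : maxi ≤ 2 ^ t := by
      have := PySem.Int.lt_two_pow_bitLength (maxi - 1)
      have : ((maxi - 1).natAbs : Int) < ((2 ^ t : Nat) : Int) := by exact_mod_cast this
      rw [habs] at this
      push_cast at this ⊢
      omega
    -- 2^(t-1) ≤ maxi - 1
    have hlb : ((2 ^ (t - 1) : Nat) : Int) ≤ maxi - 1 := by
      have := PySem.Int.two_pow_bitLength_le (maxi - 1) hne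
      calc ((2 ^ (t - 1) : Nat) : Int) ≤ ((maxi - 1).natAbs : Int) := by exact_mod_cast this
        _ = maxi - 1 := habs
    -- t ≥ 1
    have ht1 : 1 ≤ t := by
      by_contra h
      have : t = 0 := by omega
      rw [this] at hub
      norm_num at hub
      omega
    -- t ≤ 64 (fuel suffices under Dom)
    have ht64 : t ≤ 64 := by
      by_contra h
      have h64 : (2 : Nat) ^ 64 ≤ 2 ^ (t - 1) := Nat.pow_le_pow_right (by norm_num) (by omega)
      have : ((2 ^ 64 : Nat) : Int) ≤ maxi - 1 := le_trans (by exact_mod_cast h64) hlb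
      norm_num at this
      omega
    have hall : ∀ k, 1 ≤ k → k < t → 2 ^ k < maxi := by
      intro k _ hk
      have hk' : (2 : Nat) ^ k ≤ 2 ^ (t - 1) := Nat.pow_le_pow_right (by norm_num) (by omega)
      have : ((2 ^ k : Nat) : Int) ≤ maxi - 1 := le_trans (by exact_mod_cast hk') hlb
      push_cast at this
      omega
    rw [findGo_eq maxi 63 1 t ht1 (by omega) hub hall]
    simp [h2]
  · have h1 : maxi ≤ 2 ^ (1 : Nat) := by norm_num; omega
    rw [findGo_eq maxi 63 1 1 le_rfl (by omega) h1 (fun k h1 h2 => by omega)]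
    simp [h2]
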